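-- pv_equiv track=rewrite | github.com/Aca5126/gurisan-trengkas-backend | core/trengkas_rules.py | split_into_units
-- ===== SOURCE A (Python) =====
-- def normalize_trengkas_text(text: str) -> str:
--     """
--     Normalisasi teks trengkas:
--     - lowercase
--     - buang whitespace berlebihan
--     - buang aksara pelik
--
--     Contoh:
--     " MaKan " → "makan"
--     """
--     if not text:
--         return ""
--
--     cleaned = "".join(ch for ch in text.lower().strip() if ch.isalnum())
--     return cleaned
--
-- def split_into_units(text: str):
--     """
--     Pecahkan teks kepada unit trengkas.
--
--     Contoh:
--     "mangga" → ["m", "a", "ng", "g", "a"]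
--
--     Buat masa ini, fungsi ini asas dan hanya mengenal pasti "ng".
--     Ia boleh dikembangkan kemudian.
--     """
--     text = normalize_trengkas_text(text)
--     units = []
--     i = 0
--
--     while i < len(text):
--         # Gabungan "ng"
--         if i + 1 < len(text) and text[i:i+2] == "ng":
--             units.append("ng")
--             i += 2
--         else:
--             units.append(text[i])
--             i += 1
--
--     return units
-- ===== SOURCE B (Python) =====
-- def normalize_trengkas_text(text: str) -> str:
--     if not text:
--         return ""
--     cleaned = "".join(ch for ch in text.lower().strip() if ch.isalnum())
--     return cleaned
--
--
-- def split_into_units(text: str):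
--     # Single pass over the characters with a one-bit state ("an 'n' is
--     # pending"): no index bookkeeping, no lookahead slicing.
--     units = []
--     pending = False
--     for ch in normalize_trengkas_text(text):
--         if pending and ch == 'g':
--             units.append('ng')
--             pending = False
--         else:
--             if pending:
--                 units.append('n')
--             pending = (ch == 'n')
--             if not pending:
--                 units.append(ch)
--     if pending:
--         units.append('n')
--     return units
-- ===== Notes on version B (the rewrite author's own statement) =====
-- stated objective: alternative
-- what changed: Replaced A's index-based while-loop with lookahead slicing (text[i:i+2]) by a single left-to-right fold over the characters carrying a one-bit pending-flag state, flushed at the end.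
import Mathlib
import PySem

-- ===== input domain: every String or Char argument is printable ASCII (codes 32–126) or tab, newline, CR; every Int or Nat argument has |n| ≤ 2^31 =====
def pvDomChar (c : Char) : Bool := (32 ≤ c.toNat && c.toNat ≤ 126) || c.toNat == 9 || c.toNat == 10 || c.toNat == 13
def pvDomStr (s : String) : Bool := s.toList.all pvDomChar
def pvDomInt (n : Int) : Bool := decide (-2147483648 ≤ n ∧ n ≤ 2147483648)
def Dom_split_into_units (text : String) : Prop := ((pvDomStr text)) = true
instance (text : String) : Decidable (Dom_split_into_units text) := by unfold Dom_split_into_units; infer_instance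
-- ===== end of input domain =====

-- B replaces A's index-and-lookahead while-loop by a single left fold carrying a
-- "pending 'n'" flag (objective: alternative).


-- ===== PORT A =====
-- normalize_trengkas_text (shared module helper, also called by B)
def pvNormalize (text : String) : List Char :=
  if text.toList = [] then []
  else (PySem.Chars.strip (PySem.Chars.lower text.toList)).filter PySem.Chars.isalnum

-- the while-loop of A: index i over the normalized characters, lookahead slice
def pvALoop (cs : List Char) (i : Nat) : List String :=
  if h : i < cs.length then
    if i + 1 < cs.length ∧ PySem.List.slice cs (some (i : Int)) (some ((i : Int) + 2)) = ['n', 'g'] then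
      "ng" :: pvALoop cs (i + 2)
    else
      String.ofList [cs[i]] :: pvALoop cs (i + 1)
  else []
termination_by cs.length - i

def split_into_units (text : String) : List String := pvALoop (pvNormalize text) 0

-- ===== PORT B =====
-- one step of B's for-loop: state = (units so far, "an 'n' is pending")
def pvBStep (st : List String × Bool) (ch : Char) : List String × Bool :=
  if st.2 ∧ ch = 'g' then (st.1 ++ ["ng"], false)
  else
    let u := if st.2 then st.1 ++ ["n"] else st.1
    if ch = 'n' then (u, true) else (u ++ [String.ofList [ch]], false)

def split_into_units_alt (text : String) : List String :=
  let r := (pvNormalize text).foldl pvBStep ([], false)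
  if r.2 then r.1 ++ ["n"] else r.1

-- ===== PRECONDITION & SPEC =====
def Spec_split_into_units (text : String) (out : List String) : Prop := out = split_into_units_alt text
instance (text : String) (out : List String) : Decidable (Spec_split_into_units text out) := by unfold Spec_split_into_units; infer_instance

-- ===== CLAIM (what is proved, stated in full; the proofs are below) =====
def Claim_equal_split_into_units : Prop := ∀ (text : String), Dom_split_into_units text → Spec_split_into_units text (split_into_units text)

-- ===== LEMMAS AND PROOFS =====

-- the common characterisation: greedy left-to-right tokenisation merging "ng"
def pvUnits : List Char → List String
  | [] => []
  | c :: r =>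
    if c = 'n' ∧ r.head? = some 'g' then "ng" :: pvUnits r.tail
    else String.ofList [c] :: pvUnits r
termination_by l => l.length
decreasing_by all_goals (cases r <;> simp_all)

@[simp] theorem pv_ofList_n : String.ofList ['n'] = "n" := rfl

theorem pvALoop_eq (cs : List Char) (i : Nat) : pvALoop cs i = pvUnits (cs.drop i) := by
  fun_induction pvALoop cs i with
  | case1 i h hng ih =>
    rw [show ((i : Int) + 2) = ((i + 2 : Nat) : Int) by push_cast; ring,
        PySem.List.slice_natCast, show (i + 2) - i = 2 by omega] at hng
    obtain ⟨h1, hng⟩ := hng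
    have hd1 : cs.drop i = cs[i] :: cs.drop (i + 1) := List.drop_eq_getElem_cons h
    have hd2 : cs.drop (i + 1) = cs[i + 1] :: cs.drop (i + 2) := List.drop_eq_getElem_cons h1
    rw [hd1, hd2] at hng ⊢
    simp [List.take] at hng
    rw [pvUnits]
    simp [hng.1, hng.2, ih]
  | case2 i h hng ih =>
    rw [show ((i : Int) + 2) = ((i + 2 : Nat) : Int) by push_cast; ring,
        PySem.List.slice_natCast, show (i + 2) - i = 2 by omega] at hng
    have hd1 : cs.drop i = cs[i] :: cs.drop (i + 1) := List.drop_eq_getElem_cons h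
    rw [hd1, pvUnits, ih]
    by_cases h1 : i + 1 < cs.length
    · have hd2 : cs.drop (i + 1) = cs[i + 1] :: cs.drop (i + 2) := List.drop_eq_getElem_cons h1
      rw [hd1, hd2] at hng
      simp [List.take, h1] at hng
      rw [hd2]
      simp only [List.head?_cons]
      rw [if_neg]
      intro ⟨ha, hb⟩
      simp at hb
      exact hng ha hb
    · have : cs.drop (i + 1) = [] := List.drop_eq_nil_of_le (by omega)
      simp [this]
  | case3 i h => simp [List.drop_eq_nil_of_le (by omega : cs.length ≤ i), pvUnits]

theorem pvBfold (cs : List Char) : ∀ u : List String,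
    ((if (cs.foldl pvBStep (u, false)).2 then (cs.foldl pvBStep (u, false)).1 ++ ["n"] else (cs.foldl pvBStep (u, false)).1) = u ++ pvUnits cs)
    ∧ ((if (cs.foldl pvBStep (u, true)).2 then (cs.foldl pvBStep (u, true)).1 ++ ["n"] else (cs.foldl pvBStep (u, true)).1) = u ++ pvUnits ('n' :: cs)) := by
  induction cs with
  | nil => intro u; simp [pvUnits]
  | cons c r ih =>
    intro u
    constructor
    · by_cases hc : c = 'n'
      · subst hc
        simpa [pvBStep] using (ih u).2
      · have := (ih (u ++ [String.ofList [c]])).1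
        simp [pvBStep, hc, pvUnits] at this ⊢
        simp [this, pvUnits]
    · by_cases hg : c = 'g'
      · subst hg
        have := (ih (u ++ ["ng"])).1
        simp [pvBStep] at this ⊢
        simp [this, pvUnits]
      · by_cases hc : c = 'n'
        · subst hc
          have := (ih (u ++ ["n"])).2
          simp [pvBStep, hg] at this ⊢
          simp [this, pvUnits, hg]
        · have := (ih (u ++ ["n", String.ofList [c]])).1
          simp [pvBStep, hg, hc] at this ⊢
          simp [this, pvUnits, hg, hc]

-- ===== VERDICT (by name: the statement is the Claim_ definition above) =====
theorem split_into_units_spec : Claim_equal_split_into_units := by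
  intro text _
  unfold Spec_split_into_units split_into_units split_into_units_alt
  rw [pvALoop_eq]
  simpa using (pvBfold (pvNormalize text) []).1.symm
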